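-- pv_equiv track=rewrite | github.com/TeeKay-FourTwentyOne/math | ramsey-book-graphs/analyze_composite_solutions.py | is_coset
-- ===== SOURCE A (Python) =====
-- def is_coset(S, m):
--     """
--     Check if S is a coset of some subgroup of Z_m.
--     Returns (True, subgroup, offset) or (False, None, None).
--     """
--     S_set = set(S)
--     # Check all divisors of m as potential subgroup orders
--     divisors = []
--     for d in range(1, m + 1):
--         if m % d == 0:
--             divisors.append(d)
--
--     for d in divisors:
--         if d == 0:
--             continue
--         step = m // d  # elements of the subgroup {0, step, 2*step, ...}
--         subgroup = set(range(0, m, step))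
--         if len(subgroup) != d:
--             continue
--         # Check if S is a coset of this subgroup
--         for offset in range(step):
--             coset = {(s + offset) % m for s in subgroup}
--             if coset == S_set:
--                 return True, subgroup, offset
--
--     return False, None, None
-- ===== SOURCE B (Python) =====
-- def is_coset(S, m):
--     """
--     Check if S is a coset of some subgroup of Z_m.
--     Returns (True, subgroup, offset) or (False, None, None).
--     """
--     if m <= 0:
--         return False, None, None
--     d = len(set(S))
--     if d == 0 or m % d != 0:
--         return False, None, None
--     step = m // d
--     r = S[0] % step
--     if all(0 <= s < m and s % step == r for s in S):
--         return True, set(range(0, m, step)), r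
--     return False, None, None
-- ===== Notes on version B (the rewrite author's own statement) =====
-- stated objective: faster
-- what changed: Instead of scanning every divisor d of m and every offset in range(m//d) and building candidate cosets, B notes that only d = |set(S)| can match and checks directly that all elements lie in [0,m) and share one residue modulo m//d.
import Mathlib
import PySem

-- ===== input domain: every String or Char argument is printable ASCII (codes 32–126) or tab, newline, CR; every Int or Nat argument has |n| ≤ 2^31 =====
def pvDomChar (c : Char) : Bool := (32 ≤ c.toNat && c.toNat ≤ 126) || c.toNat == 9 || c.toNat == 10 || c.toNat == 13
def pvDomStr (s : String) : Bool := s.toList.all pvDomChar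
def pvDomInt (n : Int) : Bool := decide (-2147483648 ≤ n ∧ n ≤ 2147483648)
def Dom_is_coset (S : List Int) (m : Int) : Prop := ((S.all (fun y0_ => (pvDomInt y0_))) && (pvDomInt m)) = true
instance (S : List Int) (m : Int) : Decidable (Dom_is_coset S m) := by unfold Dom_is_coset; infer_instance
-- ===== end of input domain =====

-- B replaces A's scan over all divisors d of m and all offsets below m//d by a direct O(|S|) check
-- that only d = |set(S)| can match: all elements must lie in [0, m) and share one residue mod m//|set(S)|.

-- ===== PORT A =====
-- the inner 'for offset in range(step): … return …' loop: first offset whose coset equals S_set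
def isCosetInner (Sset : List Int) (m : Int) (subgroup : List Int) : List Int → Option Int
  | [] => none
  | o :: rest =>
    if PySem.Set.equal (PySem.Set.ofList (subgroup.map (fun s => PySem.Int.mod (s + o) m))) Sset
    then some o
    else isCosetInner Sset m subgroup rest

-- the outer 'for d in divisors' loop with its early return
def isCosetOuter (Sset : List Int) (m : Int) : List Int → Bool × Option (List Int) × Option Int
  | [] => (false, none, none)
  | d :: rest =>
    if d == 0 then isCosetOuter Sset m rest
    else
      let step := PySem.Int.floordiv m d
      let subgroup : PySem.Set Int := PySem.Set.ofList (PySem.List.pyRange 0 m step)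
      if ((subgroup.length : Int) != d) then isCosetOuter Sset m rest
      else
        match isCosetInner Sset m subgroup (PySem.List.pyRange 0 step 1) with
        | some o => (true, some subgroup, some o)
        | none => isCosetOuter Sset m rest

def is_coset (S : List Int) (m : Int) : Bool × Option (List Int) × Option Int :=
  let Sset : PySem.Set Int := PySem.Set.ofList S
  let divisors : List Int := (PySem.List.pyRange 1 (m + 1) 1).foldl
    (fun acc d => if (PySem.Int.mod m d == 0) then acc ++ [d] else acc) []
  isCosetOuter Sset m divisors

-- ===== PORT B =====
def is_coset_alt (S : List Int) (m : Int) : Bool × Option (List Int) × Option Int :=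
  if m ≤ 0 then (false, none, none)
  else
    let d : Int := ((PySem.Set.ofList S).length : Int)
    if d == 0 || PySem.Int.mod m d != 0 then (false, none, none)
    else
      let step := PySem.Int.floordiv m d
      let r := PySem.Int.mod (PySem.List.pyGetD S 0 0) step  -- S[0]; S ≠ [] here since d ≠ 0
      if S.all (fun s => decide (0 ≤ s) && decide (s < m) && (PySem.Int.mod s step == r)) then
        (true, some (PySem.Set.ofList (PySem.List.pyRange 0 m step)), some r)
      else (false, none, none)

-- ===== PRECONDITION & SPEC =====
def Spec_is_coset (S : List Int) (m : Int) (out : Bool × Option (List Int) × Option Int) : Prop := out = is_coset_alt S m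
instance (S : List Int) (m : Int) (out : Bool × Option (List Int) × Option Int) : Decidable (Spec_is_coset S m out) := by unfold Spec_is_coset; infer_instance

-- ===== CLAIM (what is proved, stated in full; the proofs are below) =====
def Claim_equal_is_coset : Prop := ∀ (S : List Int) (m : Int), Dom_is_coset S m → Spec_is_coset S m (is_coset S m)

-- ===== LEMMAS AND PROOFS =====

-- B's success condition, phrased exactly as the tests in is_coset_alt
def pvBCond (S : List Int) (m : Int) : Prop :=
  ((PySem.Set.ofList S).length : Int) ≠ 0 ∧
  PySem.Int.mod m ((PySem.Set.ofList S).length : Int) = 0 ∧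
  S.all (fun s => decide (0 ≤ s) && decide (s < m) &&
      (PySem.Int.mod s (PySem.Int.floordiv m ((PySem.Set.ofList S).length : Int)) ==
       PySem.Int.mod (PySem.List.pyGetD S 0 0) (PySem.Int.floordiv m ((PySem.Set.ofList S).length : Int)))) = true

lemma alt_nonpos {S : List Int} {m : Int} (hm : m ≤ 0) : is_coset_alt S m = (false, none, none) := by
  simp [is_coset_alt, hm]

lemma alt_pos {S : List Int} {m : Int} (hm : 0 < m) (hc : pvBCond S m) :
    is_coset_alt S m =
      (true,
       some (PySem.Set.ofList (PySem.List.pyRange 0 m (PySem.Int.floordiv m ((PySem.Set.ofList S).length : Int)))),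
       some (PySem.Int.mod (PySem.List.pyGetD S 0 0) (PySem.Int.floordiv m ((PySem.Set.ofList S).length : Int)))) := by
  obtain ⟨h0, hdvd, hall⟩ := hc
  have hne : PySem.Set.ofList S ≠ [] := fun h => h0 (by simp [h])
  simp [is_coset_alt, not_le.mpr hm, hne, hdvd, hall]

lemma alt_neg {S : List Int} {m : Int} (hm : 0 < m) (hc : ¬ pvBCond S m) :
    is_coset_alt S m = (false, none, none) := by
  unfold is_coset_alt
  rw [if_neg (not_le.mpr hm)]
  by_cases h0 : ((PySem.Set.ofList S).length : Int) = 0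
  · simp [h0]
  by_cases hdvd : PySem.Int.mod m ((PySem.Set.ofList S).length : Int) = 0
  · by_cases hall : S.all (fun s => decide (0 ≤ s) && decide (s < m) &&
        (PySem.Int.mod s (PySem.Int.floordiv m ((PySem.Set.ofList S).length : Int)) ==
         PySem.Int.mod (PySem.List.pyGetD S 0 0) (PySem.Int.floordiv m ((PySem.Set.ofList S).length : Int)))) = true
    · exact absurd ⟨h0, hdvd, hall⟩ hc
    · simp [hdvd, hall]
  · simp [hdvd]

-- range(0, m, step) as a map over List.range, for step ∣ m
lemma pyRange_step_eq {m step : Int} (hm : 0 < m) (hstep : 0 < step) (hdvd : step ∣ m) :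
    PySem.List.pyRange 0 m step = (List.range (m / step).toNat).map (fun k : Nat => step * (k : Int)) := by
  obtain ⟨q, hq⟩ := hdvd
  have hq0 : 0 < q := by nlinarith
  rw [PySem.List.pyRange_of_pos 0 m hstep, if_pos (by omega : (0:Int) < m)]
  have h1 : (m - 0 + step - 1) / step = m / step := by
    have he : m - 0 + step - 1 = (step - 1) + step * q := by omega
    rw [he, Int.add_mul_ediv_left _ _ (by omega : step ≠ 0),
        Int.ediv_eq_zero_of_lt (by omega) (by omega), hq,
        Int.mul_ediv_cancel_left _ (by omega : step ≠ 0)]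
    omega
  rw [h1]
  exact List.map_congr_left (fun k _ => by omega)

lemma length_pyRange_step {m step : Int} (hm : 0 < m) (hstep : 0 < step) (hdvd : step ∣ m) :
    (PySem.List.pyRange 0 m step).length = (m / step).toNat := by
  rw [pyRange_step_eq hm hstep hdvd]; simp

lemma nodup_pyRange_step {m step : Int} (hm : 0 < m) (hstep : 0 < step) (hdvd : step ∣ m) :
    (PySem.List.pyRange 0 m step).Nodup := by
  rw [pyRange_step_eq hm hstep hdvd]
  have hinj : Function.Injective (fun k : Nat => step * (k : Int)) := by
    intro a b h
    have : (a : Int) = b := mul_left_cancel₀ (by omega : step ≠ 0) h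
    exact_mod_cast this
  exact List.Nodup.map hinj List.nodup_range

lemma coset_eq_map_add {m step o : Int} (hm : 0 < m) (hstep : 0 < step) (hdvd : step ∣ m)
    (ho : 0 ≤ o) (ho2 : o < step) :
    (PySem.List.pyRange 0 m step).map (fun s => PySem.Int.mod (s + o) m) =
      (PySem.List.pyRange 0 m step).map (fun s => s + o) := by
  apply List.map_congr_left
  intro s hs
  rw [PySem.List.mem_pyRange_iff_of_pos hstep] at hs
  obtain ⟨hs0, hsm, hsd⟩ := hs
  have hsd' : step ∣ s := by simpa using hsd
  have hle : s ≤ m - step := by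
    have h1 : step ∣ m - s := Int.dvd_sub hdvd hsd'
    have h2 := Int.le_of_dvd (by omega) h1
    omega
  rw [PySem.Int.mod_eq_emod_of_pos hm]
  exact Int.emod_eq_of_lt (by omega) (by omega)


-- the coset {(s + o) % m : s ∈ range(0, m, step)} is {x ∈ [0, m) : x % step = o}
lemma mem_coset_iff {m step o : Int} (hm : 0 < m) (hstep : 0 < step) (hdvd : step ∣ m)
    (ho : 0 ≤ o) (ho2 : o < step) (x : Int) :
    x ∈ (PySem.List.pyRange 0 m step).map (fun s => PySem.Int.mod (s + o) m) ↔
      0 ≤ x ∧ x < m ∧ x % step = o := by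
  rw [coset_eq_map_add hm hstep hdvd ho ho2]
  constructor
  · intro hx
    obtain ⟨s, hs, rfl⟩ := List.mem_map.mp hx
    rw [PySem.List.mem_pyRange_iff_of_pos hstep] at hs
    obtain ⟨hs0, hsm, hsd⟩ := hs
    have hsd' : step ∣ s := by simpa using hsd
    have hle : s ≤ m - step := by
      have h1 : step ∣ m - s := Int.dvd_sub hdvd hsd'
      have h2 := Int.le_of_dvd (by omega) h1
      omega
    refine ⟨by omega, by omega, ?_⟩
    obtain ⟨k, rfl⟩ := hsd'
    rw [add_comm, Int.add_mul_emod_self_left]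
    exact Int.emod_eq_of_lt ho ho2
  · rintro ⟨hx0, hxm, hmod⟩
    refine List.mem_map.mpr ⟨x - o, ?_, by ring⟩
    rw [PySem.List.mem_pyRange_iff_of_pos hstep]
    have hdm := Int.mul_ediv_add_emod x step
    have hxo : x - o = step * (x / step) := by omega
    have hq0 : 0 ≤ x / step := Int.ediv_nonneg (by omega) (by omega)
    refine ⟨by nlinarith, by omega, by simp [hxo]⟩

lemma nodup_coset {m step o : Int} (hm : 0 < m) (hstep : 0 < step) (hdvd : step ∣ m)
    (ho : 0 ≤ o) (ho2 : o < step) :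
    ((PySem.List.pyRange 0 m step).map (fun s => PySem.Int.mod (s + o) m)).Nodup := by
  rw [coset_eq_map_add hm hstep hdvd ho ho2]
  exact (nodup_pyRange_step hm hstep hdvd).map (fun a b h => by omega)

-- the central characterization of the set-equality test in A's inner loop
lemma equal_coset_iff {m step o : Int} (S : List Int) (hm : 0 < m) (hstep : 0 < step)
    (hdvd : step ∣ m) (ho : 0 ≤ o) (ho2 : o < step) :
    (PySem.Set.equal
        (PySem.Set.ofList ((PySem.List.pyRange 0 m step).map (fun s => PySem.Int.mod (s + o) m)))
        (PySem.Set.ofList S) = true) ↔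
      ((∀ x ∈ S, 0 ≤ x ∧ x < m ∧ x % step = o) ∧
        (PySem.Set.ofList S).length = (m / step).toNat) := by
  rw [PySem.Set.equal_iff]
  have hnodC := nodup_coset hm hstep hdvd ho ho2 (o := o)
  have hlenC : ((PySem.List.pyRange 0 m step).map (fun s => PySem.Int.mod (s + o) m)).length
      = (m / step).toNat := by
    rw [List.length_map, length_pyRange_step hm hstep hdvd]
  constructor
  · intro h
    have hmem : ∀ x, x ∈ (PySem.List.pyRange 0 m step).map (fun s => PySem.Int.mod (s + o) m) ↔ x ∈ S := by
      intro x
      have := h x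
      simpa [PySem.Set.mem_ofList] using this
    constructor
    · intro x hx
      exact (mem_coset_iff hm hstep hdvd ho ho2 x).mp ((hmem x).mpr hx)
    · have hperm : (PySem.Set.ofList S).Perm
          ((PySem.List.pyRange 0 m step).map (fun s => PySem.Int.mod (s + o) m)) := by
        rw [List.perm_ext_iff_of_nodup (PySem.Set.nodup_ofList S) hnodC]
        intro a
        rw [hmem a, PySem.Set.mem_ofList]
      rw [hperm.length_eq, hlenC]
  · rintro ⟨hcond, hlen⟩
    have hsub : (PySem.Set.ofList S : List Int) ⊆
        (PySem.List.pyRange 0 m step).map (fun s => PySem.Int.mod (s + o) m) := by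
      intro x hx
      have hxS : x ∈ S := (PySem.Set.mem_ofList S x).mp hx
      exact (mem_coset_iff hm hstep hdvd ho ho2 x).mpr (hcond x hxS)
    have hperm : (PySem.Set.ofList S).Perm
        ((PySem.List.pyRange 0 m step).map (fun s => PySem.Int.mod (s + o) m)) :=
      ((PySem.Set.nodup_ofList S).subperm hsub).perm_of_length_le (by omega)
    intro x
    simp only [PySem.Set.mem_ofList]
    rw [← hperm.mem_iff]
    simp [PySem.Set.mem_ofList]

lemma inner_eq_none {Sset : List Int} {m : Int} {sub : List Int} {L : List Int}
    (h : ∀ o ∈ L, PySem.Set.equal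
        (PySem.Set.ofList (sub.map (fun s => PySem.Int.mod (s + o) m))) Sset = false) :
    isCosetInner Sset m sub L = none := by
  induction L with
  | nil => rfl
  | cons o rest ih =>
    rw [isCosetInner, if_neg (by simp [h o (by simp)])]
    exact ih (fun o' ho' => h o' (by simp [ho']))

lemma inner_eq_some {Sset : List Int} {m : Int} {sub : List Int} {L : List Int} {r : Int}
    (hr : r ∈ L)
    (h : ∀ o ∈ L, (PySem.Set.equal
        (PySem.Set.ofList (sub.map (fun s => PySem.Int.mod (s + o) m))) Sset = true ↔ o = r)) :
    isCosetInner Sset m sub L = some r := by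
  induction L with
  | nil => cases hr
  | cons o rest ih =>
    by_cases ho : o = r
    · subst ho
      rw [isCosetInner, if_pos (by rw [h o (by simp)])]
    · rw [isCosetInner, if_neg (by
        intro hcontra
        exact ho ((h o (by simp)).mp hcontra))]
      exact ih (by cases hr with | head => exact absurd rfl ho | tail _ h' => exact h')
        (fun o' ho' => h o' (by simp [ho']))

lemma outer_eq_none {Sset : List Int} {m : Int} {L : List Int}
    (h : ∀ d ∈ L, d ≠ 0 →
      isCosetInner Sset m (PySem.Set.ofList (PySem.List.pyRange 0 m (PySem.Int.floordiv m d)))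
        (PySem.List.pyRange 0 (PySem.Int.floordiv m d) 1) = none) :
    isCosetOuter Sset m L = (false, none, none) := by
  induction L with
  | nil => rfl
  | cons d rest ih =>
    rw [isCosetOuter]
    by_cases hd : d = 0
    · rw [if_pos (by simp [hd])]
      exact ih (fun d' hd' => h d' (by simp [hd']))
    · rw [if_neg (by simp [hd])]
      by_cases hlen : (((PySem.Set.ofList (PySem.List.pyRange 0 m (PySem.Int.floordiv m d)) : List Int).length : Int) != d) = true
      · simp only [hlen, if_true]
        exact ih (fun d' hd' => h d' (by simp [hd']))
      · simp only [hlen, Bool.false_eq_true, if_false]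
        rw [h d (by simp) hd]
        exact ih (fun d' hd' => h d' (by simp [hd']))

lemma outer_eq_some {Sset : List Int} {m : Int} {L : List Int} {d0 : Int}
    {v : Bool × Option (List Int) × Option Int}
    (hd0 : d0 ∈ L)
    (hfail : ∀ d ∈ L, d ≠ d0 → d ≠ 0 →
      isCosetInner Sset m (PySem.Set.ofList (PySem.List.pyRange 0 m (PySem.Int.floordiv m d)))
        (PySem.List.pyRange 0 (PySem.Int.floordiv m d) 1) = none)
    (hd0ne : d0 ≠ 0)
    (hlen : (((PySem.Set.ofList (PySem.List.pyRange 0 m (PySem.Int.floordiv m d0)) : List Int).length : Int) = d0))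
    (hsucc : ∃ r, isCosetInner Sset m
        (PySem.Set.ofList (PySem.List.pyRange 0 m (PySem.Int.floordiv m d0)))
        (PySem.List.pyRange 0 (PySem.Int.floordiv m d0) 1) = some r ∧
      v = (true, some (PySem.Set.ofList (PySem.List.pyRange 0 m (PySem.Int.floordiv m d0))), some r)) :
    isCosetOuter Sset m L = v := by
  induction L with
  | nil => cases hd0
  | cons d rest ih =>
    rw [isCosetOuter]
    by_cases hd : d = d0
    · subst hd
      rw [if_neg (by simp [hd0ne])]
      simp only [hlen, bne_self_eq_false, Bool.false_eq_true, if_false]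
      obtain ⟨r, hr, hv⟩ := hsucc
      rw [hr, hv]
    · have hrest : d0 ∈ rest := by
        rcases List.mem_cons.mp hd0 with h | h
        · exact absurd h.symm hd
        · exact h
      by_cases hdz : d = 0
      · rw [if_pos (by simp [hdz])]
        exact ih hrest (fun d' hd' => hfail d' (by simp [hd']))
      · rw [if_neg (by simp [hdz])]
        by_cases hlen' : (((PySem.Set.ofList (PySem.List.pyRange 0 m (PySem.Int.floordiv m d)) : List Int).length : Int) != d) = true
        · simp only [hlen', if_true]
          exact ih hrest (fun d' hd' => hfail d' (by simp [hd']))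
        · simp only [hlen', Bool.false_eq_true, if_false]
          rw [hfail d (by simp) hd hdz]
          exact ih hrest (fun d' hd' => hfail d' (by simp [hd']))

lemma divisors_eq (m : Int) :
    (PySem.List.pyRange 1 (m + 1) 1).foldl
      (fun acc d => if (PySem.Int.mod m d == 0) then acc ++ [d] else acc) [] =
    (PySem.List.pyRange 1 (m + 1) 1).filter (fun d => PySem.Int.mod m d == 0) := by
  have := PySem.List.foldl_append_if (fun d => PySem.Int.mod m d == 0) (id : Int → Int)
    (PySem.List.pyRange 1 (m + 1) 1) []
  simpa using this

theorem is_coset_eq_alt (S : List Int) (m : Int) : is_coset S m = is_coset_alt S m := by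
  by_cases hm : 0 < m
  · simp only [is_coset, divisors_eq]
    by_cases hc : pvBCond S m
    · have h0 := hc.1
      have hdvdmod := hc.2.1
      have hall := hc.2.2
      have hd0nn : (0:Int) ≤ ((PySem.Set.ofList S).length : Int) := Int.natCast_nonneg _
      set d0 : Int := ((PySem.Set.ofList S).length : Int) with hd0def
      have hd0pos : 0 < d0 := lt_of_le_of_ne hd0nn (Ne.symm h0)
      have hdvd : d0 ∣ m := (PySem.Int.mod_eq_zero_iff_dvd m d0).mp hdvdmod
      have hd0le : d0 ≤ m := Int.le_of_dvd hm hdvd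
      obtain ⟨q, hq⟩ := hdvd
      have hq0 : 0 < q := by nlinarith
      have hstepeq : PySem.Int.floordiv m d0 = q := by
        rw [PySem.Int.floordiv_eq_ediv_of_pos hd0pos, hq, Int.mul_ediv_cancel_left _ (by omega)]
      set step0 := PySem.Int.floordiv m d0 with hstepdef
      have hstep0 : 0 < step0 := by omega
      have hstepdvd : step0 ∣ m := ⟨d0, by rw [hstepeq, hq]; ring⟩
      have hms : m / step0 = d0 := by
        rw [hstepeq, hq]
        exact Int.mul_ediv_cancel _ (by omega)
      have hSne : S ≠ [] := by
        intro h; rw [hd0def, h] at hd0pos; simp [PySem.Set.ofList] at hd0pos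
      set r := PySem.Int.mod (PySem.List.pyGetD S 0 0) step0 with hrdef
      have hr0 : 0 ≤ r := PySem.Int.mod_nonneg _ hstep0
      have hr2 : r < step0 := PySem.Int.mod_lt _ hstep0
      have hs0mem : PySem.List.pyGetD S 0 0 ∈ S := by
        cases S with
        | nil => exact absurd rfl hSne
        | cons a t => simp [PySem.List.pyGetD_zero_cons]
      have hallx : ∀ x ∈ S, 0 ≤ x ∧ x < m ∧ x % step0 = r := by
        intro x hx
        have hx' := (List.all_eq_true.mp hall) x hx
        simp only [Bool.and_eq_true, decide_eq_true_eq, beq_iff_eq] at hx'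
        refine ⟨hx'.1.1, hx'.1.2, ?_⟩
        rw [← PySem.Int.mod_eq_emod_of_pos hstep0]
        exact hx'.2
      have hsub : (PySem.Set.ofList (PySem.List.pyRange 0 m step0) : List Int)
          = PySem.List.pyRange 0 m step0 :=
        PySem.Set.ofList_eq_self_of_nodup _ (nodup_pyRange_step hm hstep0 hstepdvd)
      rw [alt_pos hm hc]
      apply outer_eq_some (d0 := d0)
      · rw [List.mem_filter]
        refine ⟨?_, by simp [hdvdmod]⟩
        rw [PySem.List.mem_pyRange_one]
        omega
      · intro d hdmem hdned0 hdne0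
        rw [List.mem_filter] at hdmem
        obtain ⟨hdr, hdp⟩ := hdmem
        rw [PySem.List.mem_pyRange_one] at hdr
        have hddvd : d ∣ m := (PySem.Int.mod_eq_zero_iff_dvd m d).mp (by simpa using hdp)
        obtain ⟨p, hp⟩ := hddvd
        have hp0 : 0 < p := by nlinarith
        have hsteq : PySem.Int.floordiv m d = p := by
          rw [PySem.Int.floordiv_eq_ediv_of_pos (by omega), hp, Int.mul_ediv_cancel_left _ (by omega)]
        have hstp : 0 < PySem.Int.floordiv m d := by omega
        have hstdvd : PySem.Int.floordiv m d ∣ m := ⟨d, by rw [hsteq, hp]; ring⟩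
        have hmsd : m / PySem.Int.floordiv m d = d := by
          rw [hsteq, hp]
          exact Int.mul_ediv_cancel _ (by omega)
        rw [PySem.Set.ofList_eq_self_of_nodup _ (nodup_pyRange_step hm hstp hstdvd)]
        apply inner_eq_none
        intro o ho
        rw [PySem.List.mem_pyRange_one] at ho
        rw [Bool.eq_false_iff]
        intro htrue
        obtain ⟨hcond, hlen⟩ := (equal_coset_iff S hm hstp hstdvd ho.1 ho.2).mp htrue
        rw [hmsd] at hlen
        have hdd : d0 = d := by rw [hd0def, hlen, Int.toNat_of_nonneg (by omega)]
        exact hdned0 hdd.symm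
      · omega
      · rw [hsub, length_pyRange_step hm hstep0 hstepdvd, hms, Int.toNat_of_nonneg (by omega)]
      · refine ⟨r, ?_, rfl⟩
        rw [hsub]
        apply inner_eq_some
        · rw [PySem.List.mem_pyRange_one]
          exact ⟨hr0, hr2⟩
        · intro o ho
          rw [PySem.List.mem_pyRange_one] at ho
          rw [equal_coset_iff S hm hstep0 hstepdvd ho.1 ho.2]
          constructor
          · rintro ⟨hcond, _⟩
            have hso := (hcond _ hs0mem).2.2
            rw [hrdef, PySem.Int.mod_eq_emod_of_pos hstep0, hso]
          · rintro rfl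
            refine ⟨hallx, ?_⟩
            rw [hms]
            omega
    · rw [alt_neg hm hc]
      apply outer_eq_none
      intro d hdmem hdne0
      rw [List.mem_filter] at hdmem
      obtain ⟨hdr, hdp⟩ := hdmem
      rw [PySem.List.mem_pyRange_one] at hdr
      have hddvd : d ∣ m := (PySem.Int.mod_eq_zero_iff_dvd m d).mp (by simpa using hdp)
      obtain ⟨p, hp⟩ := hddvd
      have hp0 : 0 < p := by nlinarith
      have hsteq : PySem.Int.floordiv m d = p := by
        rw [PySem.Int.floordiv_eq_ediv_of_pos (by omega), hp, Int.mul_ediv_cancel_left _ (by omega)]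
      have hstp : 0 < PySem.Int.floordiv m d := by omega
      have hstdvd : PySem.Int.floordiv m d ∣ m := ⟨d, by rw [hsteq, hp]; ring⟩
      have hmsd : m / PySem.Int.floordiv m d = d := by
        rw [hsteq, hp]
        exact Int.mul_ediv_cancel _ (by omega)
      rw [PySem.Set.ofList_eq_self_of_nodup _ (nodup_pyRange_step hm hstp hstdvd)]
      apply inner_eq_none
      intro o ho
      rw [PySem.List.mem_pyRange_one] at ho
      rw [Bool.eq_false_iff]
      intro htrue
      obtain ⟨hcond, hlen⟩ := (equal_coset_iff S hm hstp hstdvd ho.1 ho.2).mp htrue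
      rw [hmsd] at hlen
      have hd0eq : ((PySem.Set.ofList S).length : Int) = d := by
        rw [hlen, Int.toNat_of_nonneg (by omega)]
      have hSne : S ≠ [] := by
        intro hnil
        rw [hnil] at hd0eq
        simp [PySem.Set.ofList] at hd0eq
        omega
      have hs0mem : PySem.List.pyGetD S 0 0 ∈ S := by
        cases S with
        | nil => exact absurd rfl hSne
        | cons a t => simp [PySem.List.pyGetD_zero_cons]
      have hro : PySem.Int.mod (PySem.List.pyGetD S 0 0) (PySem.Int.floordiv m d) = o := by
        rw [PySem.Int.mod_eq_emod_of_pos hstp]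
        exact (hcond _ hs0mem).2.2
      apply hc
      unfold pvBCond
      rw [hd0eq]
      refine ⟨by omega, by simpa using hdp, ?_⟩
      rw [List.all_eq_true]
      intro x hx
      obtain ⟨hx0, hxm, hxo⟩ := hcond x hx
      simp only [Bool.and_eq_true, decide_eq_true_eq, beq_iff_eq]
      refine ⟨⟨hx0, hxm⟩, ?_⟩
      rw [PySem.Int.mod_eq_emod_of_pos hstp, hro, hxo]
  · have hm' : m + 1 ≤ 1 := by omega
    rw [alt_nonpos (by omega)]
    simp only [is_coset, PySem.List.pyRange_one_eq_nil hm', List.foldl_nil]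
    rfl

-- ===== VERDICT (by name: the statement is the Claim_ definition above) =====
theorem is_coset_spec : Claim_equal_is_coset := by
  intro S m _
  unfold Spec_is_coset
  exact is_coset_eq_alt S m
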